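-- pv_equiv track=rewrite | github.com/ryunada/Coding_Test_Practice | Beom/Programmers/Lv.0/코드 처리하기.py | solution
-- ===== SOURCE A (Python) =====
-- def solution(code):
--     answer = ''
--     mode = 0
--     for i in range(len(code)):
--         if mode == 0:
--             if code[i] == "1":
--                 mode = 1
--             elif i % 2 == 0:
--                 answer += code[i]
--         elif mode == 1:
--             if code[i] == "1":
--                 mode = 0
--             elif i % 2 == 1:
--                 answer += code[i]
--     if len(answer) == 0:
--         return "EMPTY"
--     else:
--         return answer
-- ===== SOURCE B (Python) =====
-- def solution(code):
--     n = len(code)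
--     # pass 1: prefix_ones[i] = number of '1' characters in code[:i]
--     prefix_ones = [0] * (n + 1)
--     for i in range(n):
--         prefix_ones[i + 1] = prefix_ones[i] + (1 if code[i] == '1' else 0)
--     # pass 2: the mode at position i is exactly prefix_ones[i] % 2
--     kept = [code[i] for i in range(n)
--             if code[i] != '1' and i % 2 == prefix_ones[i] % 2]
--     return ''.join(kept) if kept else 'EMPTY'
-- ===== Notes on version B (the rewrite author's own statement) =====
-- stated objective: alternative
-- what changed: Replaces the in-loop mode-toggling state machine with two separate passes: one building a prefix table of ones-counts, then a selection comprehension keeping non-one characters whose position parity equals the parity of ones strictly before them.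
import Mathlib
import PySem

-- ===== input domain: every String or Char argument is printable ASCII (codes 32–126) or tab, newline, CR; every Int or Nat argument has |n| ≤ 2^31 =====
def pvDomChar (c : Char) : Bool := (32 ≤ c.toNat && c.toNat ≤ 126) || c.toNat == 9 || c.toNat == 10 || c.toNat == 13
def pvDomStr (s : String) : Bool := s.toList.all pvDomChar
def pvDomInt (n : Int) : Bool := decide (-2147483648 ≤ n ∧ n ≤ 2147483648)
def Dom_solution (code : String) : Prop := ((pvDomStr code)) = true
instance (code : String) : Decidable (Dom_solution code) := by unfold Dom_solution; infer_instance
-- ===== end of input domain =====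

-- B replaces A's in-loop mode toggle by a precomputed prefix-parity table plus a
-- separate selection pass (objective: alternative decomposition, same cost).

-- ===== PORT A =====
-- body of A's for-loop: one step of the mode state machine on (answer, mode)
def stepA (st : List Char × Int) (p : Int × Char) : List Char × Int :=
  if st.2 = 0 then
    if p.2 = '1' then (st.1, 1)
    else if p.1 % 2 = 0 then (st.1 ++ [p.2], st.2)
    else (st.1, st.2)
  else if st.2 = 1 then
    if p.2 = '1' then (st.1, 0)
    else if p.1 % 2 = 1 then (st.1 ++ [p.2], st.2)
    else (st.1, st.2)
  else (st.1, st.2)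

def solution (code : String) : String :=
  let r := (PySem.List.enumerate code.toList 0).foldl stepA ([], 0)
  if r.1.length = 0 then "EMPTY" else String.mk r.1

-- ===== PORT B =====
-- pass 1 of Source B: the table [ones in code[:0], ones in code[:1], …, ones in code[:n]]
def prefixOnesTable (acc : Int) : List Char → List Int
  | [] => [acc]
  | c :: cs => acc :: prefixOnesTable (acc + if c = '1' then 1 else 0) cs

-- pass 2 of Source B: keep code[i] when code[i] ≠ '1' and i % 2 == prefix_ones[i] % 2
def solution_alt (code : String) : String :=
  let cs := code.toList
  let pre := prefixOnesTable 0 cs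
  let kept := ((PySem.List.enumerate cs 0).filter
      (fun p => (p.2 != '1') && (p.1 % 2 == (pre.getD p.1.toNat 0) % 2))).map (·.2)
  if kept = [] then "EMPTY" else String.mk kept

-- ===== PRECONDITION & SPEC =====
def Spec_solution (code : String) (out : String) : Prop := out = solution_alt code
instance (code : String) (out : String) : Decidable (Spec_solution code out) := by unfold Spec_solution; infer_instance

-- ===== CLAIM (what is proved, stated in full; the proofs are below) =====
def Claim_equal_solution : Prop := ∀ (code : String), Dom_solution code → Spec_solution code (solution code)

-- ===== LEMMAS AND PROOFS =====

-- canonical "selected characters" function both ports are reduced to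
def selAux (i m : Int) : List Char → List Char
  | [] => []
  | ch :: rest =>
    if ch = '1' then selAux (i + 1) (1 - m) rest
    else if i % 2 = m then ch :: selAux (i + 1) m rest
    else selAux (i + 1) m rest

theorem loopA (cs : List Char) : ∀ (s m : Int) (ans : List Char), m = 0 ∨ m = 1 →
    ((PySem.List.enumerate cs s).foldl stepA (ans, m)).1 = ans ++ selAux s m cs := by
  induction cs with
  | nil => intro s m ans _; simp [PySem.List.enumerate_nil, selAux]
  | cons ch rest ih =>
    intro s m ans hm
    rw [PySem.List.enumerate_cons, List.foldl_cons]
    rcases hm with hm | hm <;> subst hm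
    · by_cases h1 : ch = '1'
      · have hstep : stepA (ans, 0) (s, ch) = (ans, 1) := by simp [stepA, h1]
        rw [hstep, ih (s+1) 1 ans (Or.inr rfl)]
        simp [selAux, h1]
      · by_cases hp : s % 2 = 0
        · have hstep : stepA (ans, 0) (s, ch) = (ans ++ [ch], 0) := by simp [stepA, h1, hp]
          rw [hstep, ih (s+1) 0 (ans ++ [ch]) (Or.inl rfl)]
          simp [selAux, h1, hp]
        · have hstep : stepA (ans, 0) (s, ch) = (ans, 0) := by simp [stepA, h1, hp]
          rw [hstep, ih (s+1) 0 ans (Or.inl rfl)]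
          simp [selAux, h1, hp]
    · by_cases h1 : ch = '1'
      · have hstep : stepA (ans, 1) (s, ch) = (ans, 0) := by simp [stepA, h1]
        rw [hstep, ih (s+1) 0 ans (Or.inl rfl)]
        norm_num [selAux, h1]
      · by_cases hp : s % 2 = 1
        · have hstep : stepA (ans, 1) (s, ch) = (ans ++ [ch], 1) := by simp [stepA, h1, hp]
          rw [hstep, ih (s+1) 1 (ans ++ [ch]) (Or.inr rfl)]
          simp [selAux, h1, hp]
        · have hstep : stepA (ans, 1) (s, ch) = (ans, 1) := by simp [stepA, h1, hp]
          rw [hstep, ih (s+1) 1 ans (Or.inr rfl)]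
          simp [selAux, h1, hp]

theorem selB (cs : List Char) : ∀ (s c : Int), 0 ≤ s → 0 ≤ c →
    ((PySem.List.enumerate cs s).filter
      (fun p => (p.2 != '1') && (p.1 % 2 == ((prefixOnesTable c cs).getD (p.1 - s).toNat 0) % 2))).map (·.2)
    = selAux s (c % 2) cs := by
  induction cs with
  | nil => intro s c _ _; simp [PySem.List.enumerate_nil, selAux]
  | cons ch rest ih =>
    intro s c hs hc
    rw [PySem.List.enumerate_cons, List.filter_cons]
    by_cases hch : ch = '1'
    · subst hch
      have hshift :
          ((PySem.List.enumerate rest (s+1)).filter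
            (fun p => (p.2 != '1') && (p.1 % 2 == ((prefixOnesTable c ('1' :: rest)).getD (p.1 - s).toNat 0) % 2)))
          = ((PySem.List.enumerate rest (s+1)).filter
            (fun p => (p.2 != '1') && (p.1 % 2 == ((prefixOnesTable (c + 1) rest).getD (p.1 - (s+1)).toNat 0) % 2))) := by
        apply List.filter_congr
        intro p hp
        rcases (PySem.List.mem_enumerate_iff _ _ _).1 hp with ⟨k, hk, rfl⟩
        have h1 : ((s + 1 + (k : Int)) - s).toNat = k + 1 := by omega
        have h2 : ((s + 1 + (k : Int)) - (s + 1)).toNat = k := by omega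
        simp [prefixOnesTable, h1, h2]
      simp only [bne_self_eq_false, Bool.false_and, Bool.false_eq_true, if_false]
      rw [hshift, ih (s+1) (c+1) (by omega) (by omega)]
      have hmode : (c + 1) % 2 = 1 - c % 2 := by omega
      simp [selAux, hmode]
    · have hshift :
          ((PySem.List.enumerate rest (s+1)).filter
            (fun p => (p.2 != '1') && (p.1 % 2 == ((prefixOnesTable c (ch :: rest)).getD (p.1 - s).toNat 0) % 2)))
          = ((PySem.List.enumerate rest (s+1)).filter
            (fun p => (p.2 != '1') && (p.1 % 2 == ((prefixOnesTable c rest).getD (p.1 - (s+1)).toNat 0) % 2))) := by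
        apply List.filter_congr
        intro p hp
        rcases (PySem.List.mem_enumerate_iff _ _ _).1 hp with ⟨k, hk, rfl⟩
        have h1 : ((s + 1 + (k : Int)) - s).toNat = k + 1 := by omega
        have h2 : ((s + 1 + (k : Int)) - (s + 1)).toNat = k := by omega
        simp [prefixOnesTable, hch, h1, h2]
      have hd : ((s : Int) - s).toNat = 0 := by omega
      have hhead : ((ch != '1') && ((s : Int) % 2 == ((prefixOnesTable c (ch :: rest)).getD ((s : Int) - s).toNat 0) % 2))
          = (s % 2 == c % 2) := by
        simp [prefixOnesTable, hd, hch]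
      rw [hhead, hshift]
      by_cases hp : s % 2 = c % 2
      · rw [if_pos (by simpa using hp), List.map_cons, ih (s+1) c (by omega) hc]
        simp [selAux, hch, hp]
      · rw [if_neg (by simpa using hp), ih (s+1) c (by omega) hc]
        simp [selAux, hch, hp]

theorem ports_agree (code : String) : solution code = solution_alt code := by
  simp only [solution, solution_alt]
  rw [loopA code.toList 0 0 [] (Or.inl rfl)]
  have hfilter :
      ((PySem.List.enumerate code.toList 0).filter
        (fun p => (p.2 != '1') && (p.1 % 2 == ((prefixOnesTable 0 code.toList).getD p.1.toNat 0) % 2)))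
      = ((PySem.List.enumerate code.toList 0).filter
        (fun p => (p.2 != '1') && (p.1 % 2 == ((prefixOnesTable 0 code.toList).getD (p.1 - 0).toNat 0) % 2))) := by
    apply List.filter_congr; intro p _; norm_num
  rw [hfilter, selB code.toList 0 0 (le_refl 0) (le_refl 0)]
  simp [List.length_eq_zero_iff]

-- ===== VERDICT (by name: the statement is the Claim_ definition above) =====
theorem solution_spec : Claim_equal_solution := by
  intro code _
  unfold Spec_solution
  exact ports_agree code
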